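-- pv_equiv track=rewrite | github.com/roberto-iglesia-girbal/F1-Interactive-Predictor | backend/f1-predictor.py | _analyze_stints
-- ===== SOURCE A (Python) =====
-- def _analyze_stints(laps):
--     compounds = {}
--     stint_lengths = []
--     current_compound = None
--     current_length = 0
--
--     for lap in laps:
--         c = lap['compound']
--         compounds[c] = compounds.get(c, 0) + 1
--         if current_compound is None:
--             current_compound = c
--             current_length = 1
--         elif c == current_compound:
--             current_length += 1
--         else:
--             stint_lengths.append(current_length)
--             current_compound = c
--             current_length = 1
--     if current_length > 0:
--         stint_lengths.append(current_length)
--     return compounds, stint_lengths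
-- ===== SOURCE B (Python) =====
-- def _analyze_stints(laps):
--     keys = [lap['compound'] for lap in laps]
--     # Stage 1: scan the key sequence by stint boundaries (nested index scan),
--     # producing the list of stints (compound, length) first.
--     st = []
--     i, n = 0, len(keys)
--     while i < n:
--         j = i + 1
--         while j < n and keys[j] == keys[i]:
--             j += 1
--         st.append((keys[i], j - i))
--         i = j
--     # Stage 2: derive the per-compound counts by summing stint lengths per
--     # compound (one entry per stint, not per lap); insertion order is the
--     # first stint of each compound = its first lap, matching A.
--     compounds = {}
--     for c, length in st:
--         compounds[c] = compounds.get(c, 0) + length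
--     return compounds, [length for _, length in st]
-- ===== Notes on version B (the rewrite author's own statement) =====
-- stated objective: alternative
-- what changed: Instead of A's single per-lap pass with a current_compound/current_length state machine and per-lap dict increments, B first segments the key sequence into stints with a nested boundary index scan, then derives both outputs from the stint list: stint_lengths by projection and the compound counts by adding each stint's whole length at once.
import Mathlib
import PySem

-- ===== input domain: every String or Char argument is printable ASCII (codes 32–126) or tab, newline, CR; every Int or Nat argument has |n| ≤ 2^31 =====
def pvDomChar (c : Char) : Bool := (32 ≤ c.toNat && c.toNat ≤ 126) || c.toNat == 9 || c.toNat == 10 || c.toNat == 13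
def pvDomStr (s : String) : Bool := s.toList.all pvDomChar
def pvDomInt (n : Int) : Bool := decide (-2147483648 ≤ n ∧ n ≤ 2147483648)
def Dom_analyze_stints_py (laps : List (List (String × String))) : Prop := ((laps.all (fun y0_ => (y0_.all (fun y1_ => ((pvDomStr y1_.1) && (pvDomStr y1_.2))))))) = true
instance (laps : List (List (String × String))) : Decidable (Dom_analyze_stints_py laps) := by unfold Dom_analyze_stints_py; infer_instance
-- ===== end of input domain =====

-- B segments the laps into stints first (nested boundary scan) and derives both the
-- counts (summed per stint) and the lengths from that stint list (alternative decomposition).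

-- ===== PORT A =====
-- one step of A's loop body, given c = lap['compound']
def pvStepA (s : PySem.Dict String Int × List Int × Option String × Int) (c : String) :
    PySem.Dict String Int × List Int × Option String × Int :=
  let compounds := s.1.insert c (s.1.getD c 0 + 1)
  match s.2.2.1 with
  | none => (compounds, s.2.1, some c, 1)
  | some cc =>
    if c == cc then (compounds, s.2.1, some cc, s.2.2.2 + 1)
    else (compounds, s.2.1 ++ [s.2.2.2], some c, 1)

-- lap['compound'] then the loop body; on a missing key Python raises KeyError (excluded by Pre_)
def pvBodyA (s : PySem.Dict String Int × List Int × Option String × Int)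
    (lap : List (String × String)) : PySem.Dict String Int × List Int × Option String × Int :=
  match (PySem.Dict.ofList lap).get? "compound" with
  | none => s
  | some c => pvStepA s c

def analyze_stints_py (laps : List (List (String × String))) : (List (String × Int)) × List Int :=
  let st := laps.foldl pvBodyA
    ((PySem.Dict.empty : PySem.Dict String Int), ([] : List Int), (none : Option String), (0 : Int))
  (st.1.items, if st.2.2.2 > 0 then st.2.1 ++ [st.2.2.2] else st.2.1)

-- ===== PORT B =====
-- the outer/inner index scan of Source B: the inner while advances while keys stay equal
-- (= takeWhile of the tail), the outer loop continues at the stint boundary (= dropWhile)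
def pvStints : List String → List (String × Int)
  | [] => []
  | c :: xs =>
    (c, (xs.takeWhile (fun x => x == c)).length + 1) :: pvStints (xs.dropWhile (fun x => x == c))
  termination_by ks => ks.length
  decreasing_by
    have := List.length_dropWhile_le (fun x => x == c) xs
    simpa using Nat.lt_succ_of_le this

-- stage 2 of Source B: add each stint's whole length to its compound's count
def pvAddLen (d : PySem.Dict String Int) (p : String × Int) : PySem.Dict String Int :=
  d.insert p.1 (d.getD p.1 0 + p.2)

def analyze_stints_py_alt (laps : List (List (String × String))) : (List (String × Int)) × List Int :=
  let keys := laps.filterMap (fun lap => (PySem.Dict.ofList lap).get? "compound")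
  let st := pvStints keys
  ((st.foldl pvAddLen PySem.Dict.empty).items, st.map (·.2))

-- ===== PRECONDITION & SPEC =====
-- Pre_ excludes laps missing the 'compound' key, on which Python A raises KeyError.
def Pre_analyze_stints_py (laps : List (List (String × String))) : Prop :=
  laps.all (fun lap => lap.any (fun p => p.1 == "compound")) = true
instance (laps : List (List (String × String))) : Decidable (Pre_analyze_stints_py laps) := by
  unfold Pre_analyze_stints_py; infer_instance

def pvWitness_analyze_stints_py : (List (List (String × String))) :=
  [[("compound", "SOFT")], [("compound", "SOFT")], [("compound", "HARD")]]

def Spec_analyze_stints_py (laps : List (List (String × String))) (out : (List (String × Int)) × List Int) : Prop := out = analyze_stints_py_alt laps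
instance (laps : List (List (String × String))) (out : (List (String × Int)) × List Int) : Decidable (Spec_analyze_stints_py laps out) := by unfold Spec_analyze_stints_py; infer_instance

-- ===== CLAIM (what is proved, stated in full; the proofs are below) =====
def Claim_equal_analyze_stints_py : Prop := ∀ (laps : List (List (String × String))), Dom_analyze_stints_py laps → Pre_analyze_stints_py laps → Spec_analyze_stints_py laps (analyze_stints_py laps)

-- ===== LEMMAS AND PROOFS =====

-- A's loop over laps, skipping missing keys, is its loop over the extracted compound list
theorem pv_foldl_bodyA : ∀ (laps : List (List (String × String)))
    (init : PySem.Dict String Int × List Int × Option String × Int),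
    laps.foldl pvBodyA init
      = (laps.filterMap (fun lap => (PySem.Dict.ofList lap).get? "compound")).foldl pvStepA init := by
  intro laps
  induction laps with
  | nil => intro init; simp
  | cons x xs ih =>
    intro init
    cases h : (PySem.Dict.ofList x).get? "compound" <;> simp [pvBodyA, h, ih]

-- A's per-lap dict step
def pvCStep (d : PySem.Dict String Int) (c : String) : PySem.Dict String Int :=
  d.insert c (d.getD c 0 + 1)

-- run-length encoding helpers describing the stint-length part of A's fold
def pvRleGo (c : String) (n : Int) : List String → List Int
  | [] => [n]
  | x :: xs => if x == c then pvRleGo c (n + 1) xs else n :: pvRleGo x 1 xs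

def pvRle : List String → List Int
  | [] => []
  | x :: xs => pvRleGo x 1 xs

-- the loop invariant: started with a current stint (c, n), A's fold produces
-- the count-fold on the dict and st ++ run-length encoding on the stints
theorem pv_main : ∀ (cs : List String) (d : PySem.Dict String Int) (st : List Int)
    (c : String) (n : Int), 0 < n →
    (let r := cs.foldl pvStepA (d, st, some c, n)
     r.1 = cs.foldl pvCStep d ∧
       (if r.2.2.2 > 0 then r.2.1 ++ [r.2.2.2] else r.2.1) = st ++ pvRleGo c n cs) := by
  intro cs
  induction cs with
  | nil =>
    intro d st c n hn
    simp [pvRleGo, hn]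
  | cons x xs ih =>
    intro d st c n hn
    by_cases hx : x == c
    · have := ih (pvCStep d x) st c (n + 1) (by omega)
      simpa [pvStepA, pvCStep, pvRleGo, hx] using this
    · have := ih (pvCStep d x) (st ++ [n]) x 1 (by omega)
      simpa [pvStepA, pvCStep, pvRleGo, hx] using this

-- a run of laps all on compound c adds its whole length to c's count in one insert
theorem pv_run_fold : ∀ (l : List String) (c : String), (∀ x ∈ l, x = c) →
    ∀ (d : PySem.Dict String Int) (m : Int),
    l.foldl pvCStep (d.insert c m) = d.insert c (m + l.length) := by
  intro l
  induction l with
  | nil => intro c _ d m; simp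
  | cons x xs ih =>
    intro c hall d m
    have hx : x = c := hall x (by simp)
    subst hx
    have h1 : pvCStep (d.insert x m) x = d.insert x (m + 1) := by
      simp [pvCStep, PySem.Dict.getD_insert_self, PySem.Dict.insert_insert_self]
    have := ih x (fun y hy => hall y (by simp [hy])) d (m + 1)
    simp only [List.foldl_cons, h1, this]
    congr 1
    push_cast [List.length_cons]
    ring

-- A's per-lap count fold equals B's per-stint length fold
theorem pv_counts : ∀ (ks : List String) (d : PySem.Dict String Int),
    ks.foldl pvCStep d = (pvStints ks).foldl pvAddLen d := by
  intro ks
  induction ks using pvStints.induct with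
  | case1 => intro d; simp [pvStints]
  | case2 c xs ih =>
    intro d
    have hsplit : xs = xs.takeWhile (fun x => x == c) ++ xs.dropWhile (fun x => x == c) :=
      (List.takeWhile_append_dropWhile).symm
    have hall : ∀ x ∈ xs.takeWhile (fun x => x == c), x = c := by
      intro x hx
      have hb := List.mem_takeWhile_imp hx
      exact eq_of_beq (by simpa using hb)
    calc (c :: xs).foldl pvCStep d
        = ((xs.takeWhile (fun x => x == c)) ++ xs.dropWhile (fun x => x == c)).foldl pvCStep
            (pvCStep d c) := by rw [List.foldl_cons, ← hsplit]
      _ = (xs.dropWhile (fun x => x == c)).foldl pvCStep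
            ((xs.takeWhile (fun x => x == c)).foldl pvCStep (d.insert c (d.getD c 0 + 1))) := by
            rw [List.foldl_append]; rfl
      _ = (xs.dropWhile (fun x => x == c)).foldl pvCStep
            (d.insert c (d.getD c 0 + 1 + (xs.takeWhile (fun x => x == c)).length)) := by
            rw [pv_run_fold _ c hall]
      _ = (pvStints (c :: xs)).foldl pvAddLen d := by
            rw [pvStints, List.foldl_cons, ih]
            congr 2
            simp
            ring

-- the rle accumulator closes the current stint at the next boundary
theorem pv_rleGo_eq : ∀ (xs : List String) (c : String) (n : Int),
    pvRleGo c n xs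
      = (n + ((xs.takeWhile (fun x => x == c)).length : Int))
          :: (pvStints (xs.dropWhile (fun x => x == c))).map (·.2) := by
  intro xs
  induction xs with
  | nil => intro c n; simp [pvRleGo, pvStints]
  | cons x xs ih =>
    intro c n
    by_cases hx : (x == c) = true
    · have hxc : x = c := eq_of_beq hx
      subst hxc
      rw [pvRleGo, if_pos hx, ih x (n + 1)]
      simp
      ring
    · have hx' : (x == c) = false := by simpa using hx
      rw [pvRleGo, if_neg (by simp [hx'])]
      simp only [List.takeWhile_cons, List.dropWhile_cons, hx', if_false, Bool.false_eq_true]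
      rw [pvStints, ih x 1]
      simp [add_comm]

-- A's stint-length list equals B's projection of the stint list
theorem pv_rle_eq (ks : List String) : pvRle ks = (pvStints ks).map (·.2) := by
  cases ks with
  | nil => simp [pvRle, pvStints]
  | cons c xs =>
    rw [pvRle, pv_rleGo_eq, pvStints]
    simp
    ring

theorem pv_eq_all (laps : List (List (String × String))) :
    analyze_stints_py laps = analyze_stints_py_alt laps := by
  unfold analyze_stints_py analyze_stints_py_alt
  rw [pv_foldl_bodyA]
  cases hcs : laps.filterMap (fun lap => (PySem.Dict.ofList lap).get? "compound") with
  | nil => simp [pvStints]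
  | cons c cs =>
    have hmain := pv_main cs (pvCStep PySem.Dict.empty c) [] c 1 (by omega)
    have hstep : pvStepA ((PySem.Dict.empty : PySem.Dict String Int), ([] : List Int), (none : Option String), (0 : Int)) c
        = (pvCStep PySem.Dict.empty c, [], some c, 1) := rfl
    simp only [List.foldl_cons, hstep]
    refine Prod.ext ?_ ?_
    · have hd : (c :: cs).foldl pvCStep PySem.Dict.empty
          = (pvStints (c :: cs)).foldl pvAddLen PySem.Dict.empty := pv_counts _ _
      simp only [List.foldl_cons] at hd
      simpa [hd] using congrArg PySem.Dict.items hmain.1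
    · have hr : pvRle (c :: cs) = (pvStints (c :: cs)).map (·.2) := pv_rle_eq _
      simp only [pvRle] at hr
      simpa [hr] using hmain.2

-- ===== VERDICT (by name: the statement is the Claim_ definition above) =====
theorem analyze_stints_py_spec : Claim_equal_analyze_stints_py := by
  intro laps _ _
  exact pv_eq_all laps
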